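-- pv_equiv track=rewrite | github.com/CodeMario/Algorithm | 프로그래머스/0/120869. 외계어 사전/외계어 사전.py | spelling
-- ===== SOURCE A (Python) =====
-- def spelling(spell,dic) :
--     used = []
--     for i in dic :
--         if i in used :
--             return False
--         elif i in spell :
--             used.append(i)
--             continue
--         else :
--             return False
--     return True
-- ===== SOURCE B (Python) =====
-- def spelling(spell, dic):
--     distinct = all(dic.index(w) == i for i, w in enumerate(dic))
--     in_spell = all(w in spell for w in dic)
--     return distinct and in_spell
-- ===== Notes on version B (the rewrite author's own statement) =====
-- stated objective: alternative
-- what changed: Replaced the single fused early-return loop with a running 'used' list by two independent full scans: an index-based distinctness check over enumerate(dic) and a membership check of every word in spell, combined with 'and'.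
import Mathlib
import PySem

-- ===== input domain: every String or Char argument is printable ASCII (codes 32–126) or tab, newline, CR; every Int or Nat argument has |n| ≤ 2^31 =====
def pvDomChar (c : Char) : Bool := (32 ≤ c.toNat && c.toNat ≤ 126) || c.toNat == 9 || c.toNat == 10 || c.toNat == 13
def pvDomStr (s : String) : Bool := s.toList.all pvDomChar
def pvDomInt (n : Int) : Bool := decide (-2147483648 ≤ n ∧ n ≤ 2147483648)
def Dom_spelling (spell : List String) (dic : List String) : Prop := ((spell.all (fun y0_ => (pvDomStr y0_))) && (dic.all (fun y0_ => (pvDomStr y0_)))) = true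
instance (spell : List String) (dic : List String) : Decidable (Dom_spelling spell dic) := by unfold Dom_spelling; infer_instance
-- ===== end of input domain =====

-- B restructures A's single fused early-return loop (with a growing `used` list) into two
-- independent full scans — an index-based distinctness check and a spell-membership check —
-- combined with `and`; objective: alternative decomposition, same cost.

-- ===== PORT A =====
-- the for-loop with its `used` accumulator and early returns
def spellingLoop (spell : List String) (used : List String) : List String → Bool
  | [] => true
  | i :: rest =>
    if used.contains i then false
    else if spell.contains i then spellingLoop spell (used ++ [i]) rest
    else false

def spelling (spell : List String) (dic : List String) : Bool :=
  spellingLoop spell [] dic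

-- ===== PORT B =====
def spelling_alt (spell : List String) (dic : List String) : Bool :=
  let distinct := (PySem.List.enumerate dic).all
    (fun p => ((PySem.List.index? dic p.2).map (fun k => (k : Int))) == some p.1)
  let in_spell := dic.all (fun w => spell.contains w)
  distinct && in_spell

-- ===== PRECONDITION & SPEC =====
def Spec_spelling (spell : List String) (dic : List String) (out : Bool) : Prop := out = spelling_alt spell dic
instance (spell : List String) (dic : List String) (out : Bool) : Decidable (Spec_spelling spell dic out) := by unfold Spec_spelling; infer_instance

-- ===== CLAIM (what is proved, stated in full; the proofs are below) =====
def Claim_equal_spelling : Prop := ∀ (spell : List String) (dic : List String), Dom_spelling spell dic → Spec_spelling spell dic (spelling spell dic)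

-- ===== LEMMAS AND PROOFS =====

-- A's loop succeeds iff every word is in spell, none is in `used`, and the words are distinct.
theorem spellingLoop_true_iff (spell : List String) :
    ∀ (dic used : List String), spellingLoop spell used dic = true ↔
      ((∀ x ∈ dic, x ∈ spell) ∧ (∀ x ∈ dic, x ∉ used) ∧ dic.Nodup) := by
  intro dic
  induction dic with
  | nil => intro used; simp [spellingLoop]
  | cons i rest ih =>
    intro used
    simp only [spellingLoop]
    by_cases hu : i ∈ used
    · simp [hu]
    · by_cases hs : i ∈ spell
      · simp only [List.contains_eq_mem, hu, hs, decide_true, decide_false,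
          Bool.false_eq_true, if_false, if_true, ih]
        constructor
        · rintro ⟨h1, h2, h3⟩
          refine ⟨by simpa [hs] using h1, ?_, ?_⟩
          · intro x hx
            rcases List.mem_cons.mp hx with rfl | hx
            · exact hu
            · exact fun hc => (h2 x hx) (List.mem_append.mpr (Or.inl hc))
          · refine List.nodup_cons.mpr ⟨fun hc => ?_, h3⟩
            exact (h2 i hc) (by simp)
        · rintro ⟨h1, h2, h3⟩
          rcases List.nodup_cons.mp h3 with ⟨hir, hr⟩
          refine ⟨fun x hx => h1 x (by simp [hx]), ?_, hr⟩
          intro x hx hc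
          rcases List.mem_append.mp hc with hc | hc
          · exact (h2 x (by simp [hx])) hc
          · have hxi : x = i := by simpa using hc
            exact hir (hxi ▸ hx)
      · simp [hu, hs]

-- first-occurrence index: if nothing before position k equals l[k], index? finds k
theorem index?_getElem_of_first (l : List String) (k : Nat) (hk : k < l.length)
    (h : ∀ j (hj : j < l.length), j < k → l[j] ≠ l[k]) :
    PySem.List.index? l l[k] = some k := by
  rw [PySem.List.index?_eq_some_iff]
  refine ⟨l.take k, l.drop (k+1), ?_, by simp [Nat.min_eq_left hk.le], ?_⟩
  · conv_lhs => rw [← List.take_append_drop k l]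
    rw [List.drop_eq_getElem_cons hk]
  · intro hmem
    rw [List.mem_take_iff_getElem] at hmem
    obtain ⟨j, hj, hje⟩ := hmem
    exact h j (by omega) (by omega) hje

-- B's first pass is exactly Nodup
theorem distinct_pass_iff (dic : List String) :
    ((PySem.List.enumerate dic).all
      (fun p => ((PySem.List.index? dic p.2).map (fun k => (k : Int))) == some p.1)) = true
      ↔ dic.Nodup := by
  rw [List.all_eq_true]
  constructor
  · intro h
    rw [List.Nodup, List.pairwise_iff_getElem]
    intro a b ha hb hab hc
    have hm : (((b : Int)), dic[b]) ∈ PySem.List.enumerate dic := by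
      rw [PySem.List.mem_enumerate_iff]
      exact ⟨b, hb, by simp⟩
    have hb' := h _ hm
    cases hidx : PySem.List.index? dic dic[b] with
    | none => rw [hidx] at hb'; simp at hb'
    | some k =>
      rw [hidx] at hb'
      simp at hb'
      have hkb : k = b := by exact_mod_cast hb'
      subst hkb
      obtain ⟨hklen, -, hfirst⟩ := PySem.List.getElem_of_index?_eq_some hidx
      exact hfirst a hab (hc ▸ rfl)
  · intro hnd p hp
    rw [PySem.List.mem_enumerate_iff] at hp
    obtain ⟨k, hk, rfl⟩ := hp
    have hfirst : ∀ j (hj : j < dic.length), j < k → dic[j] ≠ dic[k] := by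
      rw [List.Nodup, List.pairwise_iff_getElem] at hnd
      intro j hj hjk
      exact hnd j k hj hk hjk
    simp only
    rw [index?_getElem_of_first dic k hk hfirst]
    simp

theorem spelling_eq_alt (spell : List String) (dic : List String) :
    spelling spell dic = spelling_alt spell dic := by
  rw [Bool.eq_iff_iff]
  show spellingLoop spell [] dic = true ↔ spelling_alt spell dic = true
  rw [spellingLoop_true_iff]
  simp only [spelling_alt, Bool.and_eq_true]
  rw [distinct_pass_iff]
  simp only [List.all_eq_true, List.contains_eq_mem, decide_eq_true_eq, List.not_mem_nil,
    not_false_iff, implies_true, true_and]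
  tauto

-- ===== VERDICT (by name: the statement is the Claim_ definition above) =====
theorem spelling_spec : Claim_equal_spelling := by
  intro spell dic _
  exact spelling_eq_alt spell dic
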